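-- pv_equiv track=rewrite | github.com/jeffries17/epl_app | easypackinglist/views.py | setup_packing_lists
-- ===== SOURCE A (Python) =====
-- DEFAULT_CATEGORIES = ['clothing', 'documents', 'medication', 'toiletries', 'footwear', 'tech', 'snacks', 'etc']
--
-- def setup_packing_lists(selected_template):
--     categories = DEFAULT_CATEGORIES.copy()
--     to_pack = {category: [] for category in categories}
--     packed = {category: [] for category in categories}
--
--     for category, items in selected_template.items():
--         if category != "template_name" and category in categories:
--             to_pack[category].extend(items)
--
--     return categories, to_pack, packed
-- ===== SOURCE B (Python) =====
-- DEFAULT_CATEGORIES = ['clothing', 'documents', 'medication', 'toiletries', 'footwear', 'tech', 'snacks', 'etc']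
--
-- def setup_packing_lists(selected_template):
--     categories = DEFAULT_CATEGORIES.copy()
--     to_pack = {cat: list(selected_template.get(cat, [])) for cat in categories}
--     packed = {cat: [] for cat in categories}
--     return categories, to_pack, packed
-- ===== Notes on version B (the rewrite author's own statement) =====
-- stated objective: idiomatic
-- what changed: B builds the result by iterating the fixed category list and looking each category up in the template with get (a dict comprehension), instead of scanning the template's items, filtering by a membership test and extending buckets in place; the traversed collection is reversed and the populate loop disappears.
import Mathlib
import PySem

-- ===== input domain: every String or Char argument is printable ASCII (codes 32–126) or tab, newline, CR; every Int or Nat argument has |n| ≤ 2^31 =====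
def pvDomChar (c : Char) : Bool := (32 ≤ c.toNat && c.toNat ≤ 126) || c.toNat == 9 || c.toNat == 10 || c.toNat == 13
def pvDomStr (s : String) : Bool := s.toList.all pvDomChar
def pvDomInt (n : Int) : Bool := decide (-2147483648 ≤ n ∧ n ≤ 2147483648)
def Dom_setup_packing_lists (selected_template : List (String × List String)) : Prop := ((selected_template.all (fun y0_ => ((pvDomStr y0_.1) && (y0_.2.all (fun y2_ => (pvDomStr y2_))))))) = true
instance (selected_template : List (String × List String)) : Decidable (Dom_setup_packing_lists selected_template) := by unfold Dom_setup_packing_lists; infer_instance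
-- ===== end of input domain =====

-- B iterates the fixed category list and looks each category up in the template,
-- instead of scanning the template's items and filtering by membership (idiomatic; same cost).

-- ===== PORT A =====
def DEFAULT_CATEGORIES : List String :=
  ["clothing", "documents", "medication", "toiletries", "footwear", "tech", "snacks", "etc"]

def setup_packing_lists (selected_template : List (String × List String)) :
    List String × (List (String × List String)) × (List (String × List String)) :=
  let categories := DEFAULT_CATEGORIES
  let to_pack : PySem.Dict String (List String) :=
    PySem.Dict.mk (categories.map (fun category => (category, [])))
  let packed : PySem.Dict String (List String) :=
    PySem.Dict.mk (categories.map (fun category => (category, [])))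
  let to_pack := selected_template.foldl
    (fun d p =>
      if p.1 ≠ "template_name" ∧ p.1 ∈ categories then
        d.modify p.1 [] (· ++ p.2)
      else d)
    to_pack
  (categories, to_pack.items, packed.items)

-- ===== PORT B =====
def setup_packing_lists_alt (selected_template : List (String × List String)) :
    List String × (List (String × List String)) × (List (String × List String)) :=
  let categories := DEFAULT_CATEGORIES
  let to_pack := categories.map
    (fun cat => (cat, (PySem.Dict.mk selected_template).getD cat []))
  let packed := categories.map (fun cat => (cat, ([] : List String)))
  (categories, to_pack, packed)

-- ===== PRECONDITION & SPEC =====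
-- Pre_ excludes association lists with duplicate keys: they represent no Python dict
-- (the function's argument is a dict, whose keys are unique), and on them A's port
-- would concatenate all matching values while B's takes the first — neither is specified.
def Pre_setup_packing_lists (selected_template : List (String × List String)) : Prop :=
  (selected_template.map Prod.fst).Nodup
instance (selected_template : List (String × List String)) : Decidable (Pre_setup_packing_lists selected_template) := by unfold Pre_setup_packing_lists; infer_instance

def pvWitness_setup_packing_lists : (List (String × List String)) :=
  [("tech", ["charger"]), ("template_name", ["Beach"]), ("snacks", [])]

def Spec_setup_packing_lists (selected_template : List (String × List String)) (out : List String × (List (String × List String)) × (List (String × List String))) : Prop := out = setup_packing_lists_alt selected_template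
instance (selected_template : List (String × List String)) (out : List String × (List (String × List String)) × (List (String × List String))) : Decidable (Spec_setup_packing_lists selected_template out) := by unfold Spec_setup_packing_lists; infer_instance

-- ===== CLAIM (what is proved, stated in full; the proofs are below) =====
def Claim_equal_setup_packing_lists : Prop := ∀ (selected_template : List (String × List String)), Dom_setup_packing_lists selected_template → Pre_setup_packing_lists selected_template → Spec_setup_packing_lists selected_template (setup_packing_lists selected_template)

-- ===== LEMMAS AND PROOFS =====

-- The step function of A's loop.
def pvStepA (d : PySem.Dict String (List String)) (p : String × List String) :
    PySem.Dict String (List String) :=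
  if p.1 ≠ "template_name" ∧ p.1 ∈ DEFAULT_CATEGORIES then d.modify p.1 [] (· ++ p.2) else d

lemma pvStepA_keys (d : PySem.Dict String (List String)) (p : String × List String)
    (h : ∀ c, c ∈ DEFAULT_CATEGORIES → c ∈ d.keys) : (pvStepA d p).keys = d.keys := by
  unfold pvStepA
  split_ifs with hc
  · rw [PySem.Dict.keys_modify]
    have : d.contains p.1 = true := by
      rw [PySem.Dict.contains_iff_mem_keys]; exact h p.1 hc.2
    simp [PySem.Dict.keys_insert_of_contains, this]
  · rfl

lemma pvLoopA_keys (t : List (String × List String)) (d : PySem.Dict String (List String))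
    (h : ∀ c, c ∈ DEFAULT_CATEGORIES → c ∈ d.keys) :
    (t.foldl pvStepA d).keys = d.keys := by
  induction t generalizing d with
  | nil => rfl
  | cons p t ih =>
      simp only [List.foldl_cons]
      rw [ih (pvStepA d p) (by rw [pvStepA_keys d p h]; exact h), pvStepA_keys d p h]

lemma pvLoopA_getD (t : List (String × List String)) (d : PySem.Dict String (List String))
    (c : String) (hc : c ∈ DEFAULT_CATEGORIES) (hn : c ≠ "template_name") :
    (t.foldl pvStepA d).getD c [] =
      d.getD c [] ++ ((t.filter (fun p => p.1 == c)).map Prod.snd).flatten := by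
  induction t generalizing d with
  | nil => simp
  | cons p t ih =>
      simp only [List.foldl_cons]
      rw [ih (pvStepA d p)]
      by_cases hk : p.1 = c
      · have hcond : p.1 ≠ "template_name" ∧ p.1 ∈ DEFAULT_CATEGORIES := by
          rw [hk]; exact ⟨hn, hc⟩
        rw [pvStepA, if_pos hcond, PySem.Dict.getD_modify, if_pos hk.symm]
        simp [hk]
      · have hgd : (pvStepA d p).getD c [] = d.getD c [] := by
          unfold pvStepA
          split_ifs with hcond
          · rw [PySem.Dict.getD_modify, if_neg (fun h : c = p.1 => hk h.symm)]
          · rfl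
        simp [hgd, hk]

lemma pvFilter_flatten_eq_getD (t : List (String × List String)) (c : String)
    (hnd : (t.map Prod.fst).Nodup) :
    ((t.filter (fun p => p.1 == c)).map Prod.snd).flatten =
      (PySem.Dict.mk t).getD c [] := by
  induction t with
  | nil => rfl
  | cons p t ih =>
      simp only [List.map_cons, List.nodup_cons] at hnd
      rw [PySem.Dict.getD_eq_get?_getD, PySem.Dict.get?_mk_cons]
      by_cases hk : p.1 = c
      · have hnone : t.filter (fun q => q.1 == c) = [] := by
          apply List.filter_eq_nil_iff.mpr
          intro q hq hqc
          have : q.1 = c := by simpa using hqc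
          exact hnd.1 (this.trans hk.symm ▸ List.mem_map_of_mem hq)
        simp [hk, hnone]
      · have hne : (p.1 == c) = false := by simpa using hk
        simp only [List.filter_cons, hne, Bool.false_eq_true, if_false]
        rw [ih hnd.2, PySem.Dict.getD_eq_get?_getD]

-- ===== VERDICT (by name: the statement is the Claim_ definition above) =====
theorem setup_packing_lists_spec : Claim_equal_setup_packing_lists := by
  intro t _ hpre
  show setup_packing_lists t = setup_packing_lists_alt t
  unfold setup_packing_lists setup_packing_lists_alt
  refine Prod.ext rfl (Prod.ext ?_ rfl)
  show (t.foldl pvStepA (PySem.Dict.mk (DEFAULT_CATEGORIES.map (fun category => (category, []))))).items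
      = DEFAULT_CATEGORIES.map (fun cat => (cat, (PySem.Dict.mk t).getD cat []))
  set d0 : PySem.Dict String (List String) :=
    PySem.Dict.mk (DEFAULT_CATEGORIES.map (fun category => (category, []))) with hd0
  have hk0 : d0.keys = DEFAULT_CATEGORIES := by decide
  have hmem : ∀ c, c ∈ DEFAULT_CATEGORIES → c ∈ d0.keys := by rw [hk0]; exact fun _ h => h
  have hkeys : (t.foldl pvStepA d0).keys = DEFAULT_CATEGORIES := by
    rw [pvLoopA_keys t d0 hmem, hk0]
  have hndk : (t.foldl pvStepA d0).keys.Nodup := by rw [hkeys]; decide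
  rw [PySem.Dict.items_eq_map_keys _ hndk ([] : List String), hkeys]
  apply List.map_congr_left
  intro c hc
  have hn : c ≠ "template_name" := by
    have h : ∀ x ∈ DEFAULT_CATEGORIES, x ≠ "template_name" := by decide
    exact h c hc
  rw [pvLoopA_getD t d0 c hc hn, pvFilter_flatten_eq_getD t c hpre]
  have hz : d0.getD c [] = [] := by
    have h : ∀ x ∈ DEFAULT_CATEGORIES, d0.getD x [] = [] := by rw [hd0]; decide
    exact h c hc
  rw [hz, List.nil_append]
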